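-- pv_equiv track=rewrite | github.com/hluu3107/flows-initialization-techniques | helper.py | find_path_tree
-- ===== SOURCE A (Python) =====
-- def find_path_tree(tree,start,end,path=[]):
-- 	path = path + [start]
-- 	if start == end:
-- 		return path
-- 	for (u,v) in tree:
-- 		if u == start and v not in path:
-- 			newpath = find_path_tree(tree,v,end,path)
-- 			if newpath:
-- 				return newpath
-- 	return None
-- ===== SOURCE B (Python) =====
-- def find_path_tree(tree, start, end, path=[]):
--     # Build adjacency dict once; DFS carrying the path in REVERSE (cons, not append),
--     # reversing it only when the target is reached.
--     adj = {}
--     for u, v in tree: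
--         adj.setdefault(u, []).append(v)
--
--     def first_some(options):
--         return next((r for r in options if r is not None), None)
--
--     def dfs(node, rpath):
--         rpath = [node] + rpath
--         if node == end:
--             return rpath[::-1]
--         return first_some(dfs(v, rpath) if v not in rpath else None
--                           for v in adj.get(node, []))
--
--     return dfs(start, path[::-1])
-- ===== Notes on version B (the rewrite author's own statement) =====
-- stated objective: alternative
-- what changed: B builds an adjacency dict from the edge list once and does a DFS that maintains the path in reverse (cons-accumulator, reversed only on success) and picks the first non-None child result with a first_some combinator, instead of A rescanning the whole edge list and appending to the path at every recursive call.
import Mathlib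
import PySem

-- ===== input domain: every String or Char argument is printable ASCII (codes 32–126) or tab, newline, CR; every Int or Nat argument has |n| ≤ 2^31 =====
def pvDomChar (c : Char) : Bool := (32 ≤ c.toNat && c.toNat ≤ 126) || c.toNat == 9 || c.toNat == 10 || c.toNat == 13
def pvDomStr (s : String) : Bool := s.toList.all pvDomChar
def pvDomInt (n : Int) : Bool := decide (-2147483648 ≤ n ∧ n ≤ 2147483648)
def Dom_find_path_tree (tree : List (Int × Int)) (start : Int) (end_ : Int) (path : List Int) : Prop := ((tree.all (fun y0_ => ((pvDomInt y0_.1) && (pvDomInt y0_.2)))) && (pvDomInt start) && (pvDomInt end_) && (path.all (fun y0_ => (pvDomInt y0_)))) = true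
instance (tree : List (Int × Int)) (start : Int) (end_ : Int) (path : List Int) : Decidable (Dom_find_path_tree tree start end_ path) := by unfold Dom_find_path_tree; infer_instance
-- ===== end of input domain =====

-- B builds an adjacency dict from the edge list once and runs a DFS that keeps the path
-- in reverse (cons-accumulator, reversed only on success), taking the first non-None
-- child result, instead of A's rescan of the whole edge list and path-append at every
-- recursive call (objective: alternative).
-- Both ports use a fuel counter (tree.length + 1) only to make the same recursion total;
-- the recursion depth is bounded by the number of distinct edge targets, so fuel never runs out.

-- ===== PORT A =====
-- the 'for (u,v) in tree: …' loop of A; `rec_` is the recursive call with fuel already fixed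
def pvTryEdges (rec_ : Int → List Int → Option (List Int)) (edges : List (Int × Int))
    (start : Int) (path : List Int) : Option (List Int) :=
  match edges with
  | [] => none
  | (u, v) :: rest =>
    if u = start ∧ v ∉ path then
      match rec_ v path with
      | some p => if p.isEmpty then pvTryEdges rec_ rest start path else some p
      | none => pvTryEdges rec_ rest start path
    else pvTryEdges rec_ rest start path

def pvFindA (fuel : Nat) (tree : List (Int × Int)) (start : Int) (end_ : Int) (path : List Int) :
    Option (List Int) :=
  match fuel with
  | 0 => none
  | fuel + 1 =>
    let path' := path ++ [start]
    if start = end_ then some path'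
    else pvTryEdges (fun v p => pvFindA fuel tree v end_ p) tree start path'

def find_path_tree (tree : List (Int × Int)) (start : Int) (end_ : Int) (path : List Int) : Option (List Int) :=
  pvFindA (tree.length + 1) tree start end_ path

-- ===== PORT B =====
-- 'adj.setdefault(u, []).append(v)' loop of Source B
def pvBuildAdj (tree : List (Int × Int)) : PySem.Dict Int (List Int) :=
  tree.foldl (fun d p => d.modify p.1 [] (· ++ [p.2])) PySem.Dict.empty

-- Source B's dfs: reverse-path accumulator; 'first_some(… for v in adj.get(node, []))'
-- is List.findSome? over the child list
def pvDfsB (fuel : Nat) (adj : PySem.Dict Int (List Int)) (end_ : Int) (node : Int)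
    (rpath : List Int) : Option (List Int) :=
  match fuel with
  | 0 => none
  | fuel + 1 =>
    let rpath := node :: rpath
    if node = end_ then some rpath.reverse
    else (adj.getD node []).findSome?
      (fun v => if v ∉ rpath then pvDfsB fuel adj end_ v rpath else none)

def find_path_tree_alt (tree : List (Int × Int)) (start : Int) (end_ : Int) (path : List Int) : Option (List Int) :=
  pvDfsB (tree.length + 1) (pvBuildAdj tree) end_ start path.reverse

-- ===== PRECONDITION & SPEC =====
def Spec_find_path_tree (tree : List (Int × Int)) (start : Int) (end_ : Int) (path : List Int) (out : Option (List Int)) : Prop := out = find_path_tree_alt tree start end_ path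
instance (tree : List (Int × Int)) (start : Int) (end_ : Int) (path : List Int) (out : Option (List Int)) : Decidable (Spec_find_path_tree tree start end_ path out) := by unfold Spec_find_path_tree; infer_instance

-- ===== CLAIM =====
def Claim_equal_find_path_tree : Prop := ∀ (tree : List (Int × Int)) (start : Int) (end_ : Int) (path : List Int), Dom_find_path_tree tree start end_ path → Spec_find_path_tree tree start end_ path (find_path_tree tree start end_ path)

-- ===== LEMMAS AND PROOFS =====

-- the adjacency dict built by B holds, for each node, exactly the targets of A's filtered edges
theorem pvBuildAdj_getD (tree : List (Int × Int)) (u : Int) :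
    (pvBuildAdj tree).getD u [] = (tree.filter (fun p => p.1 == u)).map (·.2) := by
  simpa [pvBuildAdj] using
    PySem.Dict.getD_foldl_modify_append (l := tree) (d := PySem.Dict.empty) (c := u)

-- A never returns the empty path (a `some` result is always path' = path ++ [start] or
-- a child's `some p` guarded by ¬p.isEmpty), so A's truthiness test equals B's is-not-None
theorem pvTryEdges_ne_some_nil (rec_ : Int → List Int → Option (List Int))
    (edges : List (Int × Int)) (start : Int) (path : List Int) :
    pvTryEdges rec_ edges start path ≠ some [] := by
  induction edges with
  | nil => simp [pvTryEdges]
  | cons e rest ih =>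
    obtain ⟨u, v⟩ := e
    simp only [pvTryEdges]
    split_ifs with h
    · cases hr : rec_ v path with
      | none => exact ih
      | some p =>
        cases p with
        | nil => simpa using ih
        | cons a t => simp
    · exact ih

-- A's scan of the whole edge list = first non-none over the filtered child list
theorem pvTryEdges_eq_findSome (rec_ : Int → List Int → Option (List Int))
    (hne : ∀ v p, rec_ v p ≠ some [])
    (edges : List (Int × Int)) (start : Int) (path : List Int) :
    pvTryEdges rec_ edges start path
      = ((edges.filter (fun p => p.1 == start)).map (·.2)).findSome?
          (fun v => if v ∉ path then rec_ v path else none) := by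
  induction edges with
  | nil => rfl
  | cons e rest ih =>
    obtain ⟨u, v⟩ := e
    by_cases hu : u = start
    · subst hu
      simp only [pvTryEdges, List.filter_cons, beq_self_eq_true, if_true, List.map_cons,
        List.findSome?_cons]
      by_cases hv : v ∈ path
      · simp [hv, ih]
      · rw [if_pos (show True ∧ v ∉ path from ⟨trivial, hv⟩), if_pos hv]
        cases hr : rec_ v path with
        | none => exact ih
        | some p =>
          cases p with
          | nil => exact absurd hr (hne v path)
          | cons a t => simp
    · have hb : ((u, v).1 == start) = false := by simp [hu]
      simp only [pvTryEdges, List.filter_cons, hb, Bool.false_eq_true, if_false,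
        if_neg (by simp [hu] : ¬(u = start ∧ v ∉ path))]
      exact ih

theorem pvFindA_ne_some_nil (fuel : Nat) (tree : List (Int × Int)) (start end_ : Int)
    (path : List Int) : pvFindA fuel tree start end_ path ≠ some [] := by
  cases fuel with
  | zero => simp [pvFindA]
  | succ n =>
    simp only [pvFindA]
    split_ifs with h
    · simp
    · exact pvTryEdges_ne_some_nil _ tree start (path ++ [start])

-- main simulation: B's reverse-path DFS computes A's value (same fuel, any path)
theorem pvFindA_eq_dfsB (fuel : Nat) (tree : List (Int × Int)) (end_ : Int) :
    ∀ (start : Int) (path : List Int),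
      pvFindA fuel tree start end_ path
        = pvDfsB fuel (pvBuildAdj tree) end_ start path.reverse := by
  induction fuel with
  | zero => intro start path; rfl
  | succ n ih =>
    intro start path
    have hrev : start :: path.reverse = (path ++ [start]).reverse := by simp
    simp only [pvFindA, pvDfsB, hrev]
    by_cases h : start = end_
    · simp [h]
    · rw [if_neg h, if_neg h,
        pvTryEdges_eq_findSome _ (fun v p => pvFindA_ne_some_nil n tree v end_ p),
        pvBuildAdj_getD]
      refine congrArg
        (fun f => List.findSome? f
          (List.map (fun x => x.2) (List.filter (fun p => p.1 == start) tree)))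
        (funext fun v => ?_)
      simp only [List.mem_reverse]
      split_ifs with hv
      · rfl
      · exact ih v (path ++ [start])

-- ===== VERDICT =====
theorem find_path_tree_spec : Claim_equal_find_path_tree := by
  intro tree start end_ path _
  unfold Spec_find_path_tree find_path_tree find_path_tree_alt
  exact pvFindA_eq_dfsB _ tree end_ start path
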